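-- pv_equiv track=rewrite | github.com/meguinhazeromiseria/portuna | scrapers/bradesco_scraper.py | organizar_por_estado
-- ===== SOURCE A (Python) =====
-- def organizar_por_estado(items):
--     """Organiza itens por estado"""
--     por_estado = {}
--     for item in items:
--         estado = item.get('estado', 'DESCONHECIDO')
--         if not estado or len(str(estado)) > 2:
--             estado = 'DESCONHECIDO'
--         estado = str(estado).upper()
--         if estado not in por_estado:
--             por_estado[estado] = []
--         por_estado[estado].append(item)
--     return dict(sorted(por_estado.items()))
-- ===== SOURCE B (Python) =====
-- def _chave(item):
--     estado = item.get('estado', 'DESCONHECIDO')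
--     if not estado or len(str(estado)) > 2:
--         estado = 'DESCONHECIDO'
--     return str(estado).upper()
--
-- def organizar_por_estado(items):
--     """Sorted distinct state keys, then one filter pass per key (no dict bucketing)."""
--     chaves = sorted({_chave(it) for it in items})
--     return {k: [it for it in items if _chave(it) == k] for k in chaves}
-- ===== Notes on version B (the rewrite author's own statement) =====
-- stated objective: alternative
-- what changed: B replaces A's single-pass dict bucketing (then sorting the dict items) by computing the sorted set of distinct normalized state keys and building each group with a per-key filter pass over the items.
import Mathlib
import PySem

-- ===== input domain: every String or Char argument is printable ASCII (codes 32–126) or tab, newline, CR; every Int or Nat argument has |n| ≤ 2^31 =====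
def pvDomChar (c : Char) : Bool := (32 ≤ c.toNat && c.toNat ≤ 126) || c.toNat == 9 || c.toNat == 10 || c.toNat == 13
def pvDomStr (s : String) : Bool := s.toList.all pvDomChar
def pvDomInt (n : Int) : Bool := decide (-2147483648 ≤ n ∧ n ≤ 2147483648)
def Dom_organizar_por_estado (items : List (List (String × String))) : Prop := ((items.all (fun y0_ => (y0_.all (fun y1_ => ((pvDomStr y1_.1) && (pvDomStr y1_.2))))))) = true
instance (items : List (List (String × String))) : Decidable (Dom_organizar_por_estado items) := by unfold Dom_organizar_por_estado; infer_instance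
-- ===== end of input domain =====

-- B re-implements A with sorted distinct keys + one filter pass per key instead of dict
-- bucketing then key sort (objective: alternative decomposition, same return value).

-- item.get(key, dflt): first-match lookup in the association list (shared by both ports)
def pvDictGet (item : List (String × String)) (key dflt : String) : String :=
  match item with
  | [] => dflt
  | (k, v) :: rest => if k == key then v else pvDictGet rest key dflt

-- ===== PORT A =====
def organizar_por_estado (items : List (List (String × String))) : List (String × List (List (String × String))) :=
  let por_estado := items.foldl (fun d item =>
    let estado := pvDictGet item "estado" "DESCONHECIDO"
    let estado := if estado = "" ∨ PySem.Str.len estado > 2 then "DESCONHECIDO" else estado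
    let estado := PySem.Str.upper estado
    let d := if d.contains estado then d else d.insert estado ([] : List (List (String × String)))
    d.modify estado [] (fun l => l ++ [item])) PySem.Dict.empty
  -- sorted(por_estado.items()): the keys are distinct, so Python's tuple comparison is comparison by key
  PySem.List.sorted por_estado.items (fun p => p.1) false

-- ===== PORT B =====
def chaveEstado (item : List (String × String)) : String :=
  let estado := pvDictGet item "estado" "DESCONHECIDO"
  let estado := if estado = "" ∨ PySem.Str.len estado > 2 then "DESCONHECIDO" else estado
  PySem.Str.upper estado

def organizar_por_estado_alt (items : List (List (String × String))) : List (String × List (List (String × String))) :=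
  let chaves := PySem.List.sorted (PySem.Set.ofList (items.map chaveEstado)) (fun k => k) false
  chaves.map (fun k => (k, items.filter (fun it => chaveEstado it == k)))

-- ===== PRECONDITION & SPEC =====
def Spec_organizar_por_estado (items : List (List (String × String))) (out : List (String × List (List (String × String)))) : Prop := out = organizar_por_estado_alt items
instance (items : List (List (String × String))) (out : List (String × List (List (String × String)))) : Decidable (Spec_organizar_por_estado items out) := by unfold Spec_organizar_por_estado; infer_instance

-- ===== CLAIM (what is proved, stated in full; the proofs are below) =====
def Claim_equal_organizar_por_estado : Prop := ∀ (items : List (List (String × String))), Dom_organizar_por_estado items → Spec_organizar_por_estado items (organizar_por_estado items)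

-- ===== LEMMAS AND PROOFS =====

-- 'if k not in d: d[k] = []' followed by 'd[k].append(x)' is one modify-append step
theorem step_eq (d : PySem.Dict String (List (List (String × String)))) (k : String)
    (x : List (String × String)) :
    (if d.contains k then d else d.insert k ([] : List (List (String × String)))).modify k []
      (fun l => l ++ [x]) = d.modify k [] (fun l => l ++ [x]) := by
  by_cases h : d.contains k = true
  · simp [h]
  · simp only [h, Bool.false_eq_true, if_false]
    rw [PySem.Dict.modify, PySem.Dict.modify, PySem.Dict.getD_insert_self,
      PySem.Dict.insert_insert_self,
      PySem.Dict.getD_of_not_contains (h := by simpa using h), List.nil_append]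

-- ===== VERDICT (by name: the statement is the Claim_ definition above) =====
theorem organizar_por_estado_spec : Claim_equal_organizar_por_estado := by
  intro items _
  unfold Spec_organizar_por_estado organizar_por_estado organizar_por_estado_alt
  -- collapse A's loop body into a single modify step keyed by chaveEstado
  have hfold : items.foldl (fun d item =>
      let estado := pvDictGet item "estado" "DESCONHECIDO"
      let estado := if estado = "" ∨ PySem.Str.len estado > 2 then "DESCONHECIDO" else estado
      let estado := PySem.Str.upper estado
      let d := if d.contains estado then d else d.insert estado ([] : List (List (String × String)))
      d.modify estado [] (fun l => l ++ [item])) PySem.Dict.empty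
      = items.foldl (fun d item => d.modify (chaveEstado item) [] (fun l => l ++ [item]))
          PySem.Dict.empty := by
    apply congrArg (fun f => items.foldl f PySem.Dict.empty)
    funext d item
    exact step_eq d (chaveEstado item) item
  simp only [hfold]
  set D := items.foldl (fun d item => d.modify (chaveEstado item) [] (fun l => l ++ [item]))
    PySem.Dict.empty with hD
  have hkeys : D.keys = PySem.Set.ofList (items.map chaveEstado) := by
    rw [hD, PySem.Dict.keys_foldl_modify_key]
    simp [PySem.Set.update_nil_left]
  have hnodup : D.keys.Nodup := by rw [hkeys]; exact PySem.Set.nodup_ofList _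
  have hgetD : ∀ k, D.getD k [] = items.filter (fun it => chaveEstado it == k) := by
    intro k
    have hmap : D = (items.map (fun it => (chaveEstado it, it))).foldl
        (fun d p => d.modify p.1 [] (fun l => l ++ [p.2])) PySem.Dict.empty := by
      rw [hD, List.foldl_map]
    rw [hmap, PySem.Dict.getD_foldl_modify_append]
    simp [List.filter_map, Function.comp_def]
  have hitems : D.items = (PySem.Set.ofList (items.map chaveEstado)).map
      (fun k => (k, items.filter (fun it => chaveEstado it == k))) := by
    rw [PySem.Dict.items_eq_map_keys D hnodup ([] : List (List (String × String))), hkeys]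
    apply List.map_congr_left
    intro k _
    rw [hgetD k]
  rw [hitems]
  -- naming the sorted order: B's list is a key-strictly-increasing permutation of D.items
  apply PySem.List.sorted_eq_of_perm_of_pairwise_lt
  · exact List.Perm.map _ (PySem.List.sorted_perm _ _ _)
  · have := PySem.List.sorted_ofList_pairwise_lt (xs := items.map chaveEstado)
    exact List.Pairwise.map _ (fun a b h => h) this
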